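-- pv_equiv track=rewrite | github.com/LinGuohao/llm_pruning | genetic/modeling.py | decode_chromosome
-- ===== SOURCE A (Python) =====
-- from typing import List, Union, Optional, Tuple
--
-- def decode_chromosome(chromosome: List[int]) -> List[int]:
--     """
--     Decode a loop-encoded chromosome into an execution path.
--
--     Args:
--         chromosome: List[int], values in {0,1,2,...,max_loop_count}
--
--     Returns:
--         path: List[int], execution path (module indices in order)
--     """
--     path = []
--     i = 0
--     n = len(chromosome)
--
--     while i < n:
--         val = chromosome[i]
--
--         if val == 0:
--             i += 1
--             continue
--
--         if val == 1:
--             path.append(i)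
--             i += 1
--             continue
--
--         if val >= 2:
--             current_loop_count = val
--             block_indices = []
--             while i < n and chromosome[i] == current_loop_count:
--                 block_indices.append(i)
--                 i += 1
--
--             for _ in range(current_loop_count):
--                 path.extend(block_indices)
--             continue
--
--     return path
-- ===== SOURCE B (Python) =====
-- def decode_chromosome(chromosome):
--     """
--     Decode a loop-encoded chromosome into an execution path.
--
--     Two staged passes instead of A's interleaved branching walk:
--     stage 1 is a state machine over enumerate(chromosome) that materializes
--     an explicit run table [(value, indices-of-the-run)] for the maximal
--     runs of equal genes; stage 2 is a comprehension emitting each run's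
--     indices `value` times (range(value) gives 0/1/v copies for 0/1/v>=2).
--     """
--     runs, cur_val, cur_idxs = [], None, []
--     for i, v in enumerate(chromosome):
--         if cur_val == v:
--             cur_idxs.append(i)
--         else:
--             if cur_idxs:
--                 runs.append((cur_val, cur_idxs))
--             cur_val, cur_idxs = v, [i]
--     if cur_idxs:
--         runs.append((cur_val, cur_idxs))
--     return [i for val, idxs in runs for _ in range(val) for i in idxs]
-- ===== Notes on version B (the rewrite author's own statement) =====
-- stated objective: simpler
-- what changed: B splits A's single interleaved three-branch index-walking loop into two staged passes: a state machine over enumerate() that materializes an explicit run table [(value, indices)], then a comprehension emitting each run's indices value times, so the 0/1/>=2 branches disappear into range(value).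
-- outside the precondition, e.g. on decode_chromosome([-1]): A does not finish within the time limit, B returns []
import Mathlib
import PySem

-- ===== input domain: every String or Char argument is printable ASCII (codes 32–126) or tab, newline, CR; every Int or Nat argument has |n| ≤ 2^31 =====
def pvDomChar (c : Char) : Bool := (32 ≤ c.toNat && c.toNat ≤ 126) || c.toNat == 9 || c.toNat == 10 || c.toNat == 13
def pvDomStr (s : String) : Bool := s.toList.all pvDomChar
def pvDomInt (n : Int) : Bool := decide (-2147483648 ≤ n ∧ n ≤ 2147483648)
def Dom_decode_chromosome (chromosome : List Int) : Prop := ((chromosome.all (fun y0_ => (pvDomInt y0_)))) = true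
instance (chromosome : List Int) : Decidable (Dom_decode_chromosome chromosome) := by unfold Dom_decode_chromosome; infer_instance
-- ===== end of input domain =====

-- B replaces A's interleaved three-branch index-walking loop by two staged passes: a state
-- machine over enumerate() materializing an explicit run table, then a comprehension emitting
-- each run's indices value times; objective: simpler. A diverges on negative genes, so Pre_
-- restricts to the documented non-negative domain.


-- ===== PORT A =====
-- inner while of A's `val >= 2` branch: walk forward appending indices while the value equals v;
-- returns (block_indices accumulated, remaining suffix, next index i)
def blockA (l : List Int) (v : Int) (i : Int) (acc : List Int) : List Int × List Int × Int :=
  match l with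
  | [] => (acc, [], i)
  | x :: xs => if x = v then blockA xs v (i + 1) (acc ++ [i]) else (acc, x :: xs, i)

theorem blockA_len (l : List Int) (v : Int) (i : Int) (acc : List Int) :
    (blockA l v i acc).2.1.length ≤ l.length := by
  induction l generalizing i acc with
  | nil => simp [blockA]
  | cons x xs ih =>
    simp only [blockA]
    split
    · exact le_trans (ih _ _) (Nat.le_succ _)
    · simp

-- A's outer while loop over the suffix of `chromosome` starting at index i.
-- Python A never advances on a negative value (it loops forever); such inputs are excluded by
-- Pre_decode_chromosome, and the port's final `else` branch (skip) is unreachable inside Pre_.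
def goA (l : List Int) (i : Int) : List Int :=
  match l with
  | [] => []
  | v :: rest =>
    if v = 0 then goA rest (i + 1)
    else if v = 1 then i :: goA rest (i + 1)
    else if 2 ≤ v then
      -- inner while starts at index i; its first iteration always succeeds (chromosome[i] = v),
      -- so it is ported as blockA on `rest` seeded with [i]
      let r := blockA rest v (i + 1) [i]
      ((List.range v.toNat).foldl (fun acc _ => acc ++ r.1) []) ++ goA r.2.1 r.2.2
    else goA rest (i + 1)
  termination_by l.length
  decreasing_by
  · simp
  · simp
  · exact Nat.lt_succ_of_le (blockA_len rest v (i + 1) [i])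
  · simp

def decode_chromosome (chromosome : List Int) : List Int := goA chromosome 0

-- ===== PORT B =====
-- `enumerate(chromosome)` starting at index i
def enumFrom (i : Int) : List Int → List (Int × Int)
  | [] => []
  | x :: xs => (i, x) :: enumFrom (i + 1) xs

-- stage-1 state machine step: state = (runs table, cur_val, cur_idxs); `cur_val == v` is the
-- Option comparison (None never equals an int), matching Python's `==` against None
def stepB (s : List (Int × List Int) × Option Int × List Int) (p : Int × Int) :
    List (Int × List Int) × Option Int × List Int :=
  if s.2.1 = some p.2 then (s.1, s.2.1, s.2.2 ++ [p.1])
  else ((if s.2.2 = [] then s.1 else s.1 ++ [(s.2.1.getD 0, s.2.2)]), some p.2, [p.1])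

-- the trailing `if cur_idxs: runs.append(...)`; cur_val is always set when cur_idxs is nonempty
def finalizeB (s : List (Int × List Int) × Option Int × List Int) : List (Int × List Int) :=
  if s.2.2 = [] then s.1 else s.1 ++ [(s.2.1.getD 0, s.2.2)]

-- `for _ in range(val) for i in idxs` (range of a negative int is empty, hence toNat)
def repB (v : Int) (idxs : List Int) : List Int := (List.range v.toNat).flatMap (fun _ => idxs)

def decode_chromosome_alt (chromosome : List Int) : List Int :=
  (finalizeB ((enumFrom 0 chromosome).foldl stepB ([], none, []))).flatMap
    (fun r => repB r.1 r.2)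

-- ===== PRECONDITION & SPEC =====
-- Pre_ excludes chromosomes containing a negative gene: there Python A's while loop never
-- advances and A diverges (B returns the run's indices zero times there).
def Pre_decode_chromosome (chromosome : List Int) : Prop := ∀ v ∈ chromosome, 0 ≤ v
instance (chromosome : List Int) : Decidable (Pre_decode_chromosome chromosome) := by
  unfold Pre_decode_chromosome; infer_instance

def pvWitness_decode_chromosome : List Int := [2, 2, 1, 0, 3]

def Spec_decode_chromosome (chromosome : List Int) (out : List Int) : Prop := out = decode_chromosome_alt chromosome
instance (chromosome : List Int) (out : List Int) : Decidable (Spec_decode_chromosome chromosome out) := by unfold Spec_decode_chromosome; infer_instance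

-- ===== CLAIM (what is proved, stated in full; the proofs are below) =====
def Claim_equal_decode_chromosome : Prop := ∀ (chromosome : List Int), Dom_decode_chromosome chromosome → Pre_decode_chromosome chromosome → Spec_decode_chromosome chromosome (decode_chromosome chromosome)

-- ===== LEMMAS AND PROOFS =====

-- proof-side canonical run decomposition: (value, indices) of each maximal run
def spanP (v : Int) : List Int → Int → List Int × List Int × Int
  | [], i => ([], [], i)
  | x :: xs, i =>
    if x = v then
      let r := spanP v xs (i + 1)
      (i :: r.1, r.2.1, r.2.2)
    else ([], x :: xs, i)

theorem spanP_len (v : Int) (l : List Int) (i : Int) : (spanP v l i).2.1.length ≤ l.length := by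
  induction l generalizing i with
  | nil => simp [spanP]
  | cons x xs ih =>
    simp only [spanP]
    split
    · exact le_trans (ih _) (Nat.le_succ _)
    · simp

theorem spanP_sublist (v : Int) (l : List Int) (i : Int) : (spanP v l i).2.1.Sublist l := by
  induction l generalizing i with
  | nil => simp [spanP]
  | cons x xs ih =>
    simp only [spanP]
    split
    · exact List.Sublist.trans (ih _) (List.sublist_cons_self ..)
    · simp

def runsP (l : List Int) (i : Int) : List (Int × List Int) :=
  match l with
  | [] => []
  | v :: rest =>
    let r := spanP v rest (i + 1)
    (v, i :: r.1) :: runsP r.2.1 r.2.2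
  termination_by l.length
  decreasing_by
  · exact Nat.lt_succ_of_le (spanP_len v rest (i + 1))

def flatP (rs : List (Int × List Int)) : List Int := rs.flatMap (fun r => repB r.1 r.2)

theorem repB_nil (v : Int) : repB v [] = [] := by simp [repB]

theorem repB_flatten (v : Int) (xs : List Int) :
    repB v xs = (List.replicate v.toNat xs).flatten := by
  simp [repB, List.flatMap_def]

-- stage-1 invariant: from a live run (v, idxs), the fold finishes the current maximal run and
-- then produces the canonical run decomposition of the remainder
theorem foldB_inv (l : List Int) (i : Int) (runs : List (Int × List Int)) (v : Int)
    (idxs : List Int) (h : idxs ≠ []) :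
    finalizeB ((enumFrom i l).foldl stepB (runs, some v, idxs))
      = runs ++ (v, idxs ++ (spanP v l i).1)
          :: runsP (spanP v l i).2.1 (spanP v l i).2.2 := by
  induction l generalizing i runs v idxs with
  | nil => simp [enumFrom, finalizeB, spanP, runsP, h]
  | cons x xs ih =>
    simp only [enumFrom, List.foldl_cons]
    by_cases hx : x = v
    · subst hx
      rw [show stepB (runs, some x, idxs) (i, x) = (runs, some x, idxs ++ [i]) by
        simp [stepB]]
      rw [ih (i + 1) runs x (idxs ++ [i]) (by simp)]
      simp only [spanP]
      simp
    · rw [show stepB (runs, some v, idxs) (i, x)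
          = (runs ++ [(v, idxs)], some x, [i]) by simp [stepB, h, Ne.symm hx]]
      rw [ih (i + 1) (runs ++ [(v, idxs)]) x [i] (by simp)]
      conv_rhs => rw [spanP]
      rw [if_neg hx]
      simp only [runsP]
      simp

theorem alt_eq_runs (c : List Int) : decode_chromosome_alt c = flatP (runsP c 0) := by
  match c with
  | [] => simp [decode_chromosome_alt, enumFrom, finalizeB, runsP, flatP]
  | v :: rest =>
    unfold decode_chromosome_alt
    simp only [enumFrom, List.foldl_cons]
    rw [show stepB (([], none, []) : List (Int × List Int) × Option Int × List Int) (0, v)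
        = ([], some v, [0]) by simp [stepB]]
    rw [foldB_inv rest (0 + 1) [] v [0] (by simp)]
    simp only [runsP, flatP]
    simp

-- peel lemma: the flattened run decomposition of any suffix equals the contribution of the
-- maximal run of an arbitrary probed value v (empty when v is not the head) plus the rest
theorem flat_runs_span (v : Int) (l : List Int) (i : Int) :
    flatP (runsP l i)
      = repB v (spanP v l i).1 ++ flatP (runsP (spanP v l i).2.1 (spanP v l i).2.2) := by
  match l with
  | [] => simp [spanP, runsP, flatP, repB_nil]
  | x :: xs =>
    by_cases hx : x = v
    · subst hx
      conv_lhs => rw [runsP]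
      conv_rhs => rw [spanP]
      rw [if_pos rfl]
      simp [flatP]
    · rw [spanP]
      simp [hx, repB_nil]

theorem blockA_eq_spanP (l : List Int) (v : Int) (i : Int) (acc : List Int) :
    blockA l v i acc = (acc ++ (spanP v l i).1, (spanP v l i).2) := by
  induction l generalizing i acc with
  | nil => simp [blockA, spanP]
  | cons x xs ih =>
    simp only [blockA, spanP]
    split
    · simp [ih]
    · simp

theorem foldl_append_rep (n : Nat) (xs a : List Int) :
    (List.range n).foldl (fun acc _ => acc ++ xs) a = a ++ (List.replicate n xs).flatten := by
  induction n generalizing a with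
  | zero => simp
  | succ m ih =>
    rw [List.range_succ, List.foldl_append]
    simp only [List.foldl_cons, List.foldl_nil, ih]
    rw [List.replicate_succ']
    simp

theorem goA_eq_flat (l : List Int) (i : Int) (hl : ∀ v ∈ l, 0 ≤ v) :
    goA l i = flatP (runsP l i) := by
  match l with
  | [] => simp [goA, runsP, flatP]
  | v :: rest =>
    have hrest : ∀ x ∈ rest, 0 ≤ x := fun x hx => hl x (List.mem_cons_of_mem _ hx)
    have hv : 0 ≤ v := hl v (List.mem_cons_self ..)
    have hspan : ∀ x ∈ (spanP v rest (i + 1)).2.1, 0 ≤ x :=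
      fun x hx => hrest x ((spanP_sublist v rest (i + 1)).mem hx)
    have hrec : goA (spanP v rest (i + 1)).2.1 (spanP v rest (i + 1)).2.2
        = flatP (runsP (spanP v rest (i + 1)).2.1 (spanP v rest (i + 1)).2.2) :=
      goA_eq_flat _ _ hspan
    have hrec' : goA rest (i + 1) = flatP (runsP rest (i + 1)) :=
      goA_eq_flat rest (i + 1) hrest
    have hR : flatP (runsP (v :: rest) i)
        = repB v (i :: (spanP v rest (i + 1)).1)
            ++ flatP (runsP (spanP v rest (i + 1)).2.1 (spanP v rest (i + 1)).2.2) := by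
      rw [runsP]; simp [flatP]
    rw [goA]
    by_cases h0 : v = 0
    · subst h0
      rw [if_pos rfl, hrec', flat_runs_span 0 rest (i + 1), hR]
      simp [repB]
    · by_cases h1 : v = 1
      · subst h1
        rw [if_neg h0, if_pos rfl, hrec', flat_runs_span 1 rest (i + 1), hR]
        simp [repB]
      · have h2 : 2 ≤ v := by omega
        rw [if_neg h0, if_neg h1, if_pos h2]
        simp only [blockA_eq_spanP]
        rw [foldl_append_rep, hrec, hR, repB_flatten]
        simp
termination_by l.length
decreasing_by
  · exact Nat.lt_succ_of_le ((spanP_sublist v rest (i + 1)).length_le)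
  · simp

-- ===== VERDICT (by name: the statement is the Claim_ definition above) =====
theorem decode_chromosome_spec : Claim_equal_decode_chromosome := by
  intro c _ hpre
  unfold Spec_decode_chromosome decode_chromosome
  rw [alt_eq_runs]
  exact goA_eq_flat c 0 hpre
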